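-- pv_equiv track=rewrite | github.com/zjijz/compiler | proj6/code_generator.py | next_variable_name
-- ===== SOURCE A (Python) =====
-- def next_variable_name(curr_name):
--    curr_name_len = len(curr_name)
--    for i in range(curr_name_len - 1, -1, -1):
--        if curr_name[i] != 'z':
--            return curr_name[:i] + chr(ord(curr_name[i]) + 1) + curr_name[i + 1:]
--        else:
--            curr_name = curr_name[:i] + 'a' + curr_name[i + 1:]
--    return 'a' + curr_name
-- ===== SOURCE B (Python) =====
-- def next_variable_name(curr_name):
--     n = len(curr_name)
--     k = 0
--     while k < n and curr_name[n - 1 - k] == 'z':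
--         k += 1
--     if k == n:
--         return 'a' * (n + 1)
--     i = n - 1 - k
--     return curr_name[:i] + chr(ord(curr_name[i]) + 1) + 'a' * k
-- ===== Notes on version B (the rewrite author's own statement) =====
-- stated objective: alternative
-- what changed: B counts trailing 'z' characters in one pass and builds the result string once, instead of A's per-carry string rebuild on every iteration of the loop.
import Mathlib
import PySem

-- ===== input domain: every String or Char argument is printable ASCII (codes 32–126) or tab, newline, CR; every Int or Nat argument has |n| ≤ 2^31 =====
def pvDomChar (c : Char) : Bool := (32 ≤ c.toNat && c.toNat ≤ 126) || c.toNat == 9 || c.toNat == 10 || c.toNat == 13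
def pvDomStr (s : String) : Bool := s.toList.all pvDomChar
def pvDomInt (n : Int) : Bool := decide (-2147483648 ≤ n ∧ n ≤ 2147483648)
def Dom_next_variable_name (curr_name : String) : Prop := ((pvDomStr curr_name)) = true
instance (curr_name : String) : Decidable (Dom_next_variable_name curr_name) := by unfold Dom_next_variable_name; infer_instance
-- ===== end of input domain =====

-- B counts trailing 'z's in one pass, then builds the answer once; A rebuilds the string at every carry.

-- ===== PORT A =====
-- Python A's loop: i runs from len-1 down to 0; `i+1` here is the number of indices left to visit.
-- All slice indices A takes are in range, so take/drop/getD are exact.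
def nextVarLoopA (curr : List Char) : Nat → List Char
  | 0 => 'a' :: curr
  | i + 1 =>
    if curr.getD i default ≠ 'z' then
      curr.take i ++ [Char.ofNat ((curr.getD i default).toNat + 1)] ++ curr.drop (i + 1)
    else
      nextVarLoopA (curr.take i ++ ['a'] ++ curr.drop (i + 1)) i

def next_variable_name (curr_name : String) : String :=
  String.mk (nextVarLoopA curr_name.toList curr_name.toList.length)

-- ===== PORT B =====
-- B's counting loop `while k < n and curr_name[n-1-k] == 'z'` walks the string from the end,
-- i.e. it is structural recursion over the reversed character list.
def countTrailingZ : List Char → Nat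
  | [] => 0
  | c :: r => if c = 'z' then countTrailingZ r + 1 else 0

def next_variable_name_alt (curr_name : String) : String :=
  let l := curr_name.toList
  let n := l.length
  let k := countTrailingZ l.reverse
  if k = n then String.mk (List.replicate (n + 1) 'a')
  else
    let i := n - 1 - k
    String.mk (l.take i ++ [Char.ofNat ((l.getD i default).toNat + 1)] ++ List.replicate k 'a')

-- ===== PRECONDITION & SPEC =====
def Spec_next_variable_name (curr_name : String) (out : String) : Prop := out = next_variable_name_alt curr_name
instance (curr_name : String) (out : String) : Decidable (Spec_next_variable_name curr_name out) := by unfold Spec_next_variable_name; infer_instance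

-- ===== CLAIM (what is proved, stated in full; the proofs are below) =====
def Claim_equal_next_variable_name : Prop := ∀ (curr_name : String), Dom_next_variable_name curr_name → Spec_next_variable_name curr_name (next_variable_name curr_name)

-- ===== LEMMAS AND PROOFS =====

-- abstract description of A's loop, by recursion on the reversed prefix
def loopSpec : List Char → List Char → List Char
  | [], suf => 'a' :: suf
  | c :: r, suf => if c = 'z' then loopSpec r ('a' :: suf) else r.reverse ++ [Char.ofNat (c.toNat + 1)] ++ suf

lemma loopA_eq_spec (preRev suf : List Char) :
    nextVarLoopA (preRev.reverse ++ suf) preRev.length = loopSpec preRev suf := by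
  induction preRev generalizing suf with
  | nil => simp [nextVarLoopA, loopSpec]
  | cons c r ih =>
    have hget : ((c :: r).reverse ++ suf).getD r.length default = c := by
      rw [List.reverse_cons, List.append_assoc]
      simp [List.getD]
    have htake : ((c :: r).reverse ++ suf).take r.length = r.reverse := by
      rw [List.reverse_cons, List.append_assoc, List.take_left' (by simp)]
    have hdrop : ((c :: r).reverse ++ suf).drop (r.length + 1) = suf := by
      rw [List.drop_left' (by simp)]
    show nextVarLoopA ((c :: r).reverse ++ suf) (r.length + 1) = _
    rw [nextVarLoopA, hget, htake, hdrop]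
    by_cases hc : c = 'z'
    · have h2 : r.reverse ++ ['a'] ++ suf = r.reverse ++ ('a' :: suf) := by simp
      simp only [hc, loopSpec, ne_eq, not_true_eq_false, if_false, h2]
      exact ih ('a' :: suf)
    · simp [loopSpec, hc]

lemma replicate_append_cons (n : Nat) (a : Char) (l : List Char) :
    List.replicate n a ++ (a :: l) = List.replicate (n + 1) a ++ l := by
  induction n with
  | zero => simp
  | succ m ih => simp [List.replicate_succ, ih]

-- loopSpec, expressed through the trailing-z count (B's shape)
lemma loopSpec_eq_count (rev suf : List Char) :
    loopSpec rev suf =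
      if countTrailingZ rev = rev.length then List.replicate (rev.length + 1) 'a' ++ suf
      else (rev.drop (countTrailingZ rev + 1)).reverse ++
           [Char.ofNat ((rev.getD (countTrailingZ rev) default).toNat + 1)] ++
           (List.replicate (countTrailingZ rev) 'a' ++ suf) := by
  induction rev generalizing suf with
  | nil => simp [loopSpec, countTrailingZ]
  | cons c r ih =>
    by_cases hc : c = 'z'
    · have hk : countTrailingZ (c :: r) = countTrailingZ r + 1 := by simp [countTrailingZ, hc]
      rw [loopSpec, if_pos hc, ih ('a' :: suf), hk]
      by_cases h : countTrailingZ r = r.length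
      · simp [h, List.length_cons, replicate_append_cons]
      · have h1 : ¬ (countTrailingZ r + 1 = r.length + 1) := by omega
        simp only [h, if_false, List.length_cons, h1, List.drop_succ_cons, List.getD_cons_succ,
          replicate_append_cons]
    · have hk : countTrailingZ (c :: r) = 0 := by simp [countTrailingZ, hc]
      have h1 : ¬ ((0 : Nat) = r.length + 1) := by omega
      rw [loopSpec, if_neg hc, hk]
      simp

lemma getD_reverse (l : List Char) (k : Nat) (hk : k < l.length) :
    l.reverse.getD k default = l.getD (l.length - 1 - k) default := by
  have h1 : k < l.reverse.length := by simpa using hk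
  have h2 : l.length - 1 - k < l.length := by omega
  rw [List.getD_eq_getElem l.reverse _ h1, List.getD_eq_getElem l _ h2, List.getElem_reverse]

lemma drop_reverse_reverse (l : List Char) (m : Nat) :
    (l.reverse.drop m).reverse = l.take (l.length - m) := by
  rw [List.reverse_drop]
  simp

lemma countTrailingZ_le (l : List Char) : countTrailingZ l ≤ l.length := by
  induction l with
  | nil => simp [countTrailingZ]
  | cons c r ih =>
    by_cases h : c = 'z'
    · simp [countTrailingZ, h]; omega
    · simp [countTrailingZ, h]

-- the whole equivalence, at the level of character lists
lemma main_list (l : List Char) :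
    loopSpec l.reverse [] =
      (if countTrailingZ l.reverse = l.length then List.replicate (l.length + 1) 'a'
       else
         l.take (l.length - 1 - countTrailingZ l.reverse) ++
           [Char.ofNat ((l.getD (l.length - 1 - countTrailingZ l.reverse) default).toNat + 1)] ++
           List.replicate (countTrailingZ l.reverse) 'a') := by
  rw [loopSpec_eq_count]
  have hr : l.reverse.length = l.length := by simp
  by_cases h : countTrailingZ l.reverse = l.length
  · rw [if_pos (by rw [hr, h]), if_pos h, List.append_nil, hr]
  · have hk : countTrailingZ l.reverse < l.length := by
      have := countTrailingZ_le l.reverse; omega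
    rw [if_neg (by rw [hr]; exact h), if_neg h, List.append_nil,
      drop_reverse_reverse, getD_reverse _ _ hk]
    have h2 : l.length - (countTrailingZ l.reverse + 1) = l.length - 1 - countTrailingZ l.reverse := by
      omega
    rw [h2]

-- ===== VERDICT (by name: the statement is the Claim_ definition above) =====
theorem next_variable_name_spec : Claim_equal_next_variable_name := by
  intro s _
  show next_variable_name s = next_variable_name_alt s
  simp only [next_variable_name, next_variable_name_alt]
  have h0 : nextVarLoopA s.toList s.toList.length
      = nextVarLoopA (s.toList.reverse.reverse ++ []) s.toList.reverse.length := by simp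
  rw [h0, loopA_eq_spec, main_list]
  exact apply_ite String.mk _ _ _
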